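-- pv_equiv track=rewrite | github.com/RRZE-HPC/stempel | stempel/stencils/boxstencil.py | origin_symmetric
-- ===== SOURCE A (Python) =====
-- def origin_symmetric(point1='a[j-1][i+1]'):
--     """This function takes in input a point. It returns its symmetric with
--     respect to the stencil origin [j][i].
--     A point symmetry with respect to the stencil origin can be calculated
--     changing the sign to the x and y displacement. a[i-1][j] --> a[i+1][j]
--     """
--     newpoint = ''
--     tail = point1
--
--     while tail:
--         head, index, tail = tail.partition('[')
--         newpoint += head + index
--
--         head, index, tail = tail.partition(']')
--         if '-' in head:
--             head = head.replace('-', '+')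
--         elif '+' in head:
--             head = head.replace('+', '-')
--
--         newpoint += head + index
--
--     return newpoint
-- ===== SOURCE B (Python) =====
-- def origin_symmetric(point1='a[j-1][i+1]'):
--     """Single-pass character scan with an inside-brackets state flag,
--     instead of repeated str.partition calls."""
--     def flip(seg):
--         s = ''.join(seg)
--         if '-' in s:
--             s = s.replace('-', '+')
--         elif '+' in s:
--             s = s.replace('+', '-')
--         return s
--
--     out = []
--     buf = []
--     inside = False
--     for ch in point1:
--         if inside:
--             if ch == ']':
--                 out.append(flip(buf) + ']')
--                 buf = []
--                 inside = False
--             else: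
--                 buf.append(ch)
--         else:
--             out.append(ch)
--             if ch == '[':
--                 inside = True
--     out.append(flip(buf))
--     return ''.join(out)
-- ===== Notes on version B (the rewrite author's own statement) =====
-- stated objective: alternative
-- what changed: Replaced the repeated str.partition while-loop over shrinking tails with a single left-to-right character scan driven by an inside-brackets state flag that buffers each bracket body and flips its signs when the bracket closes or the string ends.
import Mathlib
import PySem

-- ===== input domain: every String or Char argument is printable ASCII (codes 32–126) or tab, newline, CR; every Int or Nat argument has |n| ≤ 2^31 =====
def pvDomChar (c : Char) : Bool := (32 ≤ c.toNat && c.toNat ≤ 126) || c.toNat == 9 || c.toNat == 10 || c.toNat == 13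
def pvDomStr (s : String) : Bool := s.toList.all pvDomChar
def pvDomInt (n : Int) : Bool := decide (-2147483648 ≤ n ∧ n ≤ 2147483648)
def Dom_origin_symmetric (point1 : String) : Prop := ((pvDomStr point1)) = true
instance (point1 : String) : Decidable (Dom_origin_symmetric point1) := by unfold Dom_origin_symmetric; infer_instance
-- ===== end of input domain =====

-- B replaces A's repeated str.partition while-loop by a single character scan with an
-- inside-brackets state flag (objective: alternative, same output on every input).

-- ===== PORT A =====
-- s.partition(c) for a one-character separator c: (head, sep-if-found, tail). Exact.
def pvPart (c : Char) : List Char → List Char × List Char × List Char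
  | [] => ([], [], [])
  | x :: xs =>
    if x = c then ([], [c], xs)
    else
      let p := pvPart c xs
      (x :: p.1, p.2.1, p.2.2)

-- termination facts for A's while-loop (the tail strictly shrinks each iteration)
theorem pvPart_le (c : Char) (s : List Char) : (pvPart c s).2.2.length ≤ s.length := by
  induction s with
  | nil => simp [pvPart]
  | cons x xs ih =>
    simp only [pvPart]
    split
    · simp
    · simpa using Nat.le_succ_of_le ih

theorem pvPart_lt (c : Char) (s : List Char) (h : s ≠ []) : (pvPart c s).2.2.length < s.length := by
  cases s with
  | nil => exact absurd rfl h
  | cons x xs =>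
    simp only [pvPart]
    split
    · simp
    · simpa using Nat.lt_succ_of_le (pvPart_le c xs)

-- A's while-loop, carrying the accumulated newpoint; literal step for step.
def pvALoop (newpoint tail : List Char) : List Char :=
  if htail : tail = [] then newpoint
  else
    let p1 := pvPart '[' tail
    let p2 := pvPart ']' p1.2.2
    let head2 :=
      if PySem.Chars.isIn ['-'] p2.1 then PySem.Chars.replace p2.1 ['-'] ['+']
      else if PySem.Chars.isIn ['+'] p2.1 then PySem.Chars.replace p2.1 ['+'] ['-']
      else p2.1
    pvALoop (newpoint ++ p1.1 ++ p1.2.1 ++ head2 ++ p2.2.1) p2.2.2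
termination_by tail.length
decreasing_by
  exact Nat.lt_of_le_of_lt (pvPart_le ']' _) (pvPart_lt '[' tail htail)

def origin_symmetric (point1 : String) : String :=
  String.mk (pvALoop [] point1.toList)

-- ===== PORT B =====
-- B's helper flip(seg): sign-flip one bracket body ('-' wins over '+').
def pvFlip (seg : List Char) : List Char :=
  if PySem.Chars.isIn ['-'] seg then PySem.Chars.replace seg ['-'] ['+']
  else if PySem.Chars.isIn ['+'] seg then PySem.Chars.replace seg ['+'] ['-']
  else seg

-- B's loop body: state = (out, buf, inside)
def pvBStep (st : List Char × List Char × Bool) (ch : Char) : List Char × List Char × Bool :=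
  if st.2.2 then
    if ch = ']' then (st.1 ++ (pvFlip st.2.1 ++ [']']), [], false)
    else (st.1, st.2.1 ++ [ch], true)
  else
    (st.1 ++ [ch], st.2.1, ch == '[')

def origin_symmetric_alt (point1 : String) : String :=
  let st := point1.toList.foldl pvBStep ([], [], false)
  String.mk (st.1 ++ pvFlip st.2.1)

-- ===== PRECONDITION & SPEC =====
def Spec_origin_symmetric (point1 : String) (out : String) : Prop := out = origin_symmetric_alt point1
instance (point1 : String) (out : String) : Decidable (Spec_origin_symmetric point1 out) := by unfold Spec_origin_symmetric; infer_instance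

-- ===== CLAIM (what is proved, stated in full; the proofs are below) =====
def Claim_equal_origin_symmetric : Prop := ∀ (point1 : String), Dom_origin_symmetric point1 → Spec_origin_symmetric point1 (origin_symmetric point1)

-- ===== LEMMAS AND PROOFS =====

-- Common reference machine: pvMach scans outside brackets, pvMachIn inside (buf = body so far).
mutual
def pvMach : List Char → List Char
  | [] => []
  | c :: cs => if c = '[' then c :: pvMachIn [] cs else c :: pvMach cs
def pvMachIn (buf : List Char) : List Char → List Char
  | [] => pvFlip buf
  | c :: cs => if c = ']' then pvFlip buf ++ ']' :: pvMach cs else pvMachIn (buf ++ [c]) cs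
end

theorem pvFlip_nil : pvFlip [] = [] := by decide

theorem pvSplitFirst {c : Char} {s : List Char} (h : c ∈ s) :
    ∃ hd t, s = hd ++ c :: t ∧ c ∉ hd := by
  induction s with
  | nil => cases h
  | cons x xs ih =>
    by_cases hx : x = c
    · exact ⟨[], xs, by simp [hx], by simp⟩
    · rcases ih ((List.mem_cons.mp h).resolve_left (fun h' => hx h'.symm)) with
        ⟨hd, t, rfl, hni⟩
      exact ⟨x :: hd, t, rfl, by simp [hni]; exact fun h' => hx h'.symm⟩

theorem pvPart_not_mem {c : Char} {s : List Char} (h : c ∉ s) : pvPart c s = (s, [], []) := by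
  induction s with
  | nil => rfl
  | cons x xs ih =>
    simp only [List.mem_cons, not_or] at h
    have hx : x ≠ c := fun h' => h.1 h'.symm
    simp [pvPart, hx, ih h.2]

theorem pvPart_split {c : Char} {hd : List Char} (t : List Char) (h : c ∉ hd) :
    pvPart c (hd ++ c :: t) = (hd, [c], t) := by
  induction hd with
  | nil => simp [pvPart]
  | cons x xs ih =>
    simp only [List.mem_cons, not_or] at h
    have hx : x ≠ c := fun h' => h.1 h'.symm
    simp [pvPart, hx, ih h.2]

theorem pvMach_no_open {s : List Char} (h : '[' ∉ s) : pvMach s = s := by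
  induction s with
  | nil => rfl
  | cons x xs ih =>
    simp only [List.mem_cons, not_or] at h
    have hx : x ≠ '[' := fun h' => h.1 h'.symm
    simp [pvMach, hx, ih h.2]

theorem pvMach_open {hd : List Char} (t : List Char) (h : '[' ∉ hd) :
    pvMach (hd ++ '[' :: t) = hd ++ '[' :: pvMachIn [] t := by
  induction hd with
  | nil => simp [pvMach]
  | cons x xs ih =>
    simp only [List.mem_cons, not_or] at h
    have hx : x ≠ '[' := fun h' => h.1 h'.symm
    simp [pvMach, hx, ih h.2]

theorem pvMachIn_no_close {t : List Char} (h : ']' ∉ t) (buf : List Char) :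
    pvMachIn buf t = pvFlip (buf ++ t) := by
  induction t generalizing buf with
  | nil => simp [pvMachIn]
  | cons x xs ih =>
    simp only [List.mem_cons, not_or] at h
    have hx : x ≠ ']' := fun h' => h.1 h'.symm
    simp [pvMachIn, hx, ih h.2]

theorem pvMachIn_close {hd : List Char} (t : List Char) (h : ']' ∉ hd) (buf : List Char) :
    pvMachIn buf (hd ++ ']' :: t) = pvFlip (buf ++ hd) ++ ']' :: pvMach t := by
  induction hd generalizing buf with
  | nil => simp [pvMachIn]
  | cons x xs ih =>
    simp only [List.mem_cons, not_or] at h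
    have hx : x ≠ ']' := fun h' => h.1 h'.symm
    simp [pvMachIn, hx, ih h.2]

-- A's loop computes the reference machine.
theorem pvALoop_eq_aux (n : Nat) : ∀ tail : List Char, tail.length < n →
    ∀ np, pvALoop np tail = np ++ pvMach tail := by
  induction n with
  | zero => intro t h np; omega
  | succ n ih =>
    intro tail hn np
    by_cases htail : tail = []
    · subst htail; simp [pvALoop, pvMach]
    · rw [pvALoop]; simp only [htail, dite_false]
      by_cases hop : '[' ∈ tail
      · rcases pvSplitFirst hop with ⟨h1, t1, rfl, hno⟩
        rw [pvPart_split t1 hno]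
        by_cases hcl : ']' ∈ t1
        · rcases pvSplitFirst hcl with ⟨h2, t2, rfl, hnc⟩
          rw [pvPart_split t2 hnc]
          have ht2 : t2.length < n := by
            simp only [List.length_append, List.length_cons] at hn; omega
          rw [ih t2 ht2]
          rw [pvMach_open _ hno, pvMachIn_close _ hnc]
          simp [pvFlip]
        · rw [pvPart_not_mem hcl]
          rw [ih [] (by simp only [List.length_nil, List.length_append, List.length_cons] at hn ⊢; omega)]
          rw [pvMach_open _ hno, pvMachIn_no_close hcl]
          simp [pvFlip, pvMach]
      · rw [pvPart_not_mem hop]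
        have hnil : pvPart ']' ([] : List Char) = ([], [], []) := rfl
        rw [hnil]
        rw [ih [] (by have := List.length_pos_iff.mpr htail; simp only [List.length_nil]; omega)]
        have hfn : pvFlip [] = [] := pvFlip_nil
        unfold pvFlip at hfn
        simp [pvMach_no_open hop, pvMach, hfn]

theorem pvALoop_eq (tail : List Char) (np : List Char) :
    pvALoop np tail = np ++ pvMach tail :=
  pvALoop_eq_aux (tail.length + 1) tail (Nat.lt_succ_self _) np

-- B's fold computes the reference machine (both machine states at once).
theorem pvBFold (cs : List Char) :
    (∀ out buf, (cs.foldl pvBStep (out, buf, true)).1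
        ++ pvFlip (cs.foldl pvBStep (out, buf, true)).2.1 = out ++ pvMachIn buf cs) ∧
    (∀ out, (cs.foldl pvBStep (out, [], false)).1
        ++ pvFlip (cs.foldl pvBStep (out, [], false)).2.1 = out ++ pvMach cs) := by
  induction cs with
  | nil => exact ⟨fun out buf => by simp [pvMachIn], fun out => by simp [pvMach, pvFlip_nil]⟩
  | cons c cs ih =>
    refine ⟨fun out buf => ?_, fun out => ?_⟩
    · by_cases hc : c = ']'
      · subst hc
        have hstep : pvBStep (out, buf, true) ']' = (out ++ (pvFlip buf ++ [']']), [], false) := rfl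
        rw [List.foldl_cons, hstep, ih.2]
        simp [pvMachIn]
      · have hstep : pvBStep (out, buf, true) c = (out, buf ++ [c], true) := by
          simp [pvBStep, hc]
        rw [List.foldl_cons, hstep, ih.1]
        simp [pvMachIn, hc]
    · have hstep : pvBStep (out, [], false) c = (out ++ [c], [], c == '[') := rfl
      by_cases hc : c = '['
      · subst hc
        have hbt : ('[' == '[') = true := rfl
        rw [List.foldl_cons, hstep, hbt, ih.1]
        simp [pvMach]
      · rw [List.foldl_cons, hstep, beq_eq_false_iff_ne.mpr hc, ih.2]
        simp [pvMach, hc]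

-- ===== VERDICT (by name: the statement is the Claim_ definition above) =====
theorem origin_symmetric_spec : Claim_equal_origin_symmetric := by
  intro point1 _
  unfold Spec_origin_symmetric origin_symmetric origin_symmetric_alt
  show String.mk (pvALoop [] point1.toList)
      = String.mk ((point1.toList.foldl pvBStep ([], [], false)).1
          ++ pvFlip (point1.toList.foldl pvBStep ([], [], false)).2.1)
  rw [pvALoop_eq, (pvBFold point1.toList).2 []]
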